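-- pv_equiv track=rewrite | github.com/codejedi-ai/GirlfriendGPT | src/core/memory/consolidation.py | _quick_summary
-- ===== SOURCE A (Python) =====
-- from typing import Any, Dict, List, Optional
--
-- def _quick_summary(messages: List[Dict[str, Any]]) -> str:
--     """Create a quick summary of messages.
--
--     Args:
--         messages: Messages to summarize
--
--     Returns:
--         Summary string
--     """
--     if not messages:
--         return "[No conversation history]"
--
--     # Extract key information
--     user_messages = [m for m in messages if m.get("role") == "user"]
--     assistant_messages = [m for m in messages if m.get("role") == "assistant"]
--
--     summary_parts = [
--         f"Conversation with {len(user_messages)} user messages "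
--         f"and {len(assistant_messages)} assistant messages."
--     ]
--
--     # Add first and last message previews
--     if user_messages:
--         first = user_messages[0].get("content", "")[:100]
--         last = user_messages[-1].get("content", "")[:100]
--         summary_parts.append(f"First topic: {first}...")
--         summary_parts.append(f"Last topic: {last}...")
--
--     return "\n".join(summary_parts)
-- ===== SOURCE B (Python) =====
-- def _quick_summary(messages):
--     """Create a quick summary of messages (single pass over the list)."""
--     if not messages:
--         return "[No conversation history]"
--     user_count = 0
--     assistant_count = 0
--     first = None
--     last = None
--     for m in messages:
--         role = m.get("role")
--         if role == "user":
--             user_count += 1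
--             content = m.get("content", "")[:100]
--             if first is None:
--                 first = content
--             last = content
--         elif role == "assistant":
--             assistant_count += 1
--     parts = [
--         f"Conversation with {user_count} user messages "
--         f"and {assistant_count} assistant messages."
--     ]
--     if first is not None:
--         parts.append(f"First topic: {first}...")
--         parts.append(f"Last topic: {last}...")
--     return "\n".join(parts)
-- ===== Notes on version B (the rewrite author's own statement) =====
-- stated objective: alternative
-- what changed: Replaces the two role-filtering list comprehensions (and the later indexing into the filtered list) with one fold over messages that maintains only two counters and the first/last user-message contents.
import Mathlib
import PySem

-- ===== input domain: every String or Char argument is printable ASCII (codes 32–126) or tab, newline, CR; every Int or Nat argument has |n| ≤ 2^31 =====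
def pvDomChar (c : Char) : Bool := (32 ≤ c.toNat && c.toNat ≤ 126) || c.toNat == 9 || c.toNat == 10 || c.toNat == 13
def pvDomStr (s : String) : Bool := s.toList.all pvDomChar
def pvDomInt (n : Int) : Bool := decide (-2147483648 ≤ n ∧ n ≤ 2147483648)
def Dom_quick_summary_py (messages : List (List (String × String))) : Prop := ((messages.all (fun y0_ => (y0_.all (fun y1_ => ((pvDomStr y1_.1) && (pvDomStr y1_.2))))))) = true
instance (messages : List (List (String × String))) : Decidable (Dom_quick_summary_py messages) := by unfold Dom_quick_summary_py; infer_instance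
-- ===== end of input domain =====

-- B replaces the two role-filtering comprehensions with one fold keeping counters and the
-- first/last user-message contents; objective: alternative (same cost, no filtered lists).

-- shared helpers: m.get("role") == "user" / "assistant", and m.get("content", "")[:100]
def pvIsUser (m : List (String × String)) : Bool := (PySem.Dict.mk m).get? "role" == some "user"
def pvIsAsst (m : List (String × String)) : Bool := (PySem.Dict.mk m).get? "role" == some "assistant"
def pvContent (m : List (String × String)) : String :=
  PySem.Str.slice ((PySem.Dict.mk m).getD "content" "") none (some 100)

-- ===== PORT A =====
def quick_summary_py (messages : List (List (String × String))) : String :=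
  if messages.isEmpty then "[No conversation history]"
  else
    let user_messages := messages.filter pvIsUser
    let assistant_messages := messages.filter pvIsAsst
    let summary_parts := ["Conversation with " ++ PySem.Int.toStr (user_messages.length : Int) ++
      " user messages and " ++ PySem.Int.toStr (assistant_messages.length : Int) ++ " assistant messages."]
    let summary_parts :=
      if user_messages.isEmpty then summary_parts
      else
        let first := pvContent (user_messages.headD [])      -- user_messages[0]
        let last := pvContent (user_messages.getLastD [])    -- user_messages[-1]
        summary_parts ++ ["First topic: " ++ first ++ "...", "Last topic: " ++ last ++ "..."]
    PySem.Str.join "\n" summary_parts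

-- ===== PORT B =====
def pvStep (s : Int × Int × Option String × Option String) (m : List (String × String)) :
    Int × Int × Option String × Option String :=
  if pvIsUser m then
    let c := pvContent m
    (s.1 + 1, s.2.1, (if s.2.2.1.isNone then some c else s.2.2.1), some c)
  else if pvIsAsst m then (s.1, s.2.1 + 1, s.2.2.1, s.2.2.2)
  else s

def quick_summary_py_alt (messages : List (List (String × String))) : String :=
  if messages.isEmpty then "[No conversation history]"
  else
    let st := messages.foldl pvStep (0, 0, none, none)
    let parts := ["Conversation with " ++ PySem.Int.toStr st.1 ++
      " user messages and " ++ PySem.Int.toStr st.2.1 ++ " assistant messages."]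
    let parts :=
      match st.2.2.1, st.2.2.2 with
      | some f, some l => parts ++ ["First topic: " ++ f ++ "...", "Last topic: " ++ l ++ "..."]
      | _, _ => parts
    PySem.Str.join "\n" parts

-- ===== PRECONDITION & SPEC =====
def Spec_quick_summary_py (messages : List (List (String × String))) (out : String) : Prop := out = quick_summary_py_alt messages
instance (messages : List (List (String × String))) (out : String) : Decidable (Spec_quick_summary_py messages out) := by unfold Spec_quick_summary_py; infer_instance

-- ===== CLAIM (what is proved, stated in full; the proofs are below) =====
def Claim_equal_quick_summary_py : Prop := ∀ (messages : List (List (String × String))), Dom_quick_summary_py messages → Spec_quick_summary_py messages (quick_summary_py messages)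

-- ===== LEMMAS AND PROOFS =====

theorem pvStep_invariant (ms : List (List (String × String)))
    (u a : Int) (f l : Option String) :
    ms.foldl pvStep (u, a, f, l) =
      (u + ((ms.filter pvIsUser).length : Int),
       a + ((ms.filter pvIsAsst).length : Int),
       f.or (((ms.filter pvIsUser).head?).map pvContent),
       ((((ms.filter pvIsUser).getLast?).map pvContent)).or l) := by
  induction ms generalizing u a f l with
  | nil => simp
  | cons m ms ih =>
    by_cases hu : pvIsUser m
    · have hna : ¬ pvIsAsst m = true := by
        simp [pvIsUser] at hu; simp [pvIsAsst, hu]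
      simp only [List.foldl_cons, List.filter_cons]
      rw [show pvStep (u, a, f, l) m =
          (u + 1, a, (if f.isNone then some (pvContent m) else f), some (pvContent m)) from by
        simp [pvStep, hu]]
      rw [ih]
      simp only [hu, hna, if_pos, if_neg, Bool.false_eq_true, not_false_iff]
      refine Prod.ext ?_ (Prod.ext rfl (Prod.ext ?_ ?_))
      · simp only [List.length_cons]; push_cast; ring
      · cases f <;> simp [Option.or]
      · cases h : (ms.filter pvIsUser).getLast? with
        | none =>
          have hnil : ms.filter pvIsUser = [] := by
            cases hh : ms.filter pvIsUser with
            | nil => rfl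
            | cons x xs => rw [hh] at h; simp [List.getLast?] at h
          simp [List.getLast?_cons, hnil, Option.or]
        | some x =>
          rw [List.getLast?_cons]
          cases hh : ms.filter pvIsUser with
          | nil => rw [hh] at h; simp at h
          | cons y ys =>
            rw [hh] at h
            simp [h, Option.or]
    · by_cases ha : pvIsAsst m
      · simp only [List.foldl_cons, List.filter_cons]
        rw [show pvStep (u, a, f, l) m = (u, a + 1, f, l) from by simp [pvStep, hu, ha]]
        rw [ih]
        simp only [hu, ha, Bool.false_eq_true, not_false_iff, if_neg, if_pos,
          List.length_cons]
        refine Prod.ext rfl (Prod.ext ?_ rfl)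
        push_cast; ring
      · simp only [List.foldl_cons, List.filter_cons]
        rw [show pvStep (u, a, f, l) m = (u, a, f, l) from by simp [pvStep, hu, ha]]
        rw [ih]
        simp [hu, ha]

-- ===== VERDICT (by name: the statement is the Claim_ definition above) =====
theorem quick_summary_py_spec : Claim_equal_quick_summary_py := by
  intro messages _
  unfold Spec_quick_summary_py quick_summary_py quick_summary_py_alt
  by_cases hm : messages.isEmpty
  · simp [hm]
  · simp only [hm, Bool.false_eq_true, not_false_iff, if_neg]
    rw [pvStep_invariant]
    simp only [zero_add]
    cases hus : messages.filter pvIsUser with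
    | nil => simp [Option.or]
    | cons m0 rest =>
      have hlast : (m0 :: rest).getLast? = some ((m0 :: rest).getLastD []) := by
        cases h : (m0 :: rest).getLast? with
        | none => simp at h
        | some x => simp [List.getLastD_eq_getLast?, h]
      simp only [List.isEmpty_cons, List.head?_cons, hlast, Option.map_some, Option.or,
        Bool.false_eq_true, if_neg, not_false_iff, List.headD_cons]
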